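-- pv_equiv track=rewrite | github.com/oliviapy960825/algo_practice | 6_11_algo/SequenceMaintenance.py | sequenceMaintenance
-- ===== SOURCE A (Python) =====
-- def sequenceMaintenance(n, q, a, b):
--     # write your code here
--     if n==0 or not a:
--         return []
--     lst=[]
--     for o in b:
--         count=0
--         for num in range(len(a)):
--             if a[num]>=o:
--                 count+=1
--                 a[num]-=1
--         lst.append(count)
--
--     return lst
-- ===== SOURCE B (Python) =====
-- def sequenceMaintenance(n, q, a, b):
--     # Loop interchange: one pass per element of a over the query list,
--     # accumulating the per-query counts; a is not mutated.
--     if n == 0 or not a: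
--         return []
--     counts = [0] * len(b)
--     for v in a:
--         x = v
--         for j, o in enumerate(b):
--             if x >= o:
--                 counts[j] += 1
--                 x -= 1
--     return counts
-- ===== Notes on version B (the rewrite author's own statement) =====
-- stated objective: alternative
-- what changed: B interchanges the loops: instead of scanning the whole array per query and decrementing it in place, B walks each element once across the query list, carrying the element's decremented value and accumulating all query counts in one vector (and, unlike A, B does not mutate a).
import Mathlib
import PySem

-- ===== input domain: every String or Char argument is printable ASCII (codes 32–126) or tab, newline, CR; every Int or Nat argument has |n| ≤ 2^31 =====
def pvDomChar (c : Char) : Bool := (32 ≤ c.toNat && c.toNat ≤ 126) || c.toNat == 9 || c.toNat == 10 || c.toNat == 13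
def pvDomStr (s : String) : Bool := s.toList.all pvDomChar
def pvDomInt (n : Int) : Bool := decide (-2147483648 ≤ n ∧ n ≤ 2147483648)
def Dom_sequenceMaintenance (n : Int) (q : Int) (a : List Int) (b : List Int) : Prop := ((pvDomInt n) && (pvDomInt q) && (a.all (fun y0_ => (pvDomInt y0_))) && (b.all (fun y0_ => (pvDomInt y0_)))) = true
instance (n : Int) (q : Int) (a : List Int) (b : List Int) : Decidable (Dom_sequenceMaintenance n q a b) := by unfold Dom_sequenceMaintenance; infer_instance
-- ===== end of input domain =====

-- B interchanges A's loops (one pass per element over the query list, accumulating all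
-- counts) — an alternative of the same cost; equivalence is about the RETURN value only:
-- Python A mutates its argument a in place, Python B does not.

-- ===== PORT A =====
-- inner loop of A over the array for one query o: returns (count, decremented array)
def pvStepA (o : Int) : List Int → Int → Int × List Int
  | [], count => (count, [])
  | x :: rest, count =>
    if x ≥ o then
      let (c, ys) := pvStepA o rest (count + 1)
      (c, (x - 1) :: ys)
    else
      let (c, ys) := pvStepA o rest count
      (c, x :: ys)

-- outer loop of A over the queries, threading the mutated array
def pvLoopA (a : List Int) : List Int → List Int
  | [] => []
  | o :: bs =>
    let (c, a') := pvStepA o a 0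
    c :: pvLoopA a' bs

def sequenceMaintenance (n : Int) (q : Int) (a : List Int) (b : List Int) : List Int :=
  if n = 0 ∨ a = [] then [] else pvLoopA a b

-- ===== PORT B =====
-- one pass of element x across the queries, bumping the matching counts
def pvPassB (x : Int) : List Int → List Int → List Int
  | o :: bs, c :: cs =>
    if x ≥ o then (c + 1) :: pvPassB (x - 1) bs cs
    else c :: pvPassB x bs cs
  | _, _ => []

def sequenceMaintenance_alt (n : Int) (q : Int) (a : List Int) (b : List Int) : List Int :=
  if n = 0 ∨ a = [] then []
  else a.foldl (fun cs v => pvPassB v b cs) (List.replicate b.length 0)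

-- ===== PRECONDITION & SPEC =====
def Spec_sequenceMaintenance (n : Int) (q : Int) (a : List Int) (b : List Int) (out : List Int) : Prop := out = sequenceMaintenance_alt n q a b
instance (n : Int) (q : Int) (a : List Int) (b : List Int) (out : List Int) : Decidable (Spec_sequenceMaintenance n q a b out) := by unfold Spec_sequenceMaintenance; infer_instance

-- ===== CLAIM (what is proved, stated in full; the proofs are below) =====
def Claim_equal_sequenceMaintenance : Prop := ∀ (n : Int) (q : Int) (a : List Int) (b : List Int), Dom_sequenceMaintenance n q a b → Spec_sequenceMaintenance n q a b (sequenceMaintenance n q a b)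

-- ===== LEMMAS AND PROOFS =====

-- the per-element contribution vector of value x across the queries
def pvContrib (x : Int) : List Int → List Int
  | [] => []
  | o :: bs => if x ≥ o then 1 :: pvContrib (x - 1) bs else 0 :: pvContrib x bs

theorem pvStepA_acc (o : Int) (xs : List Int) (k : Int) :
    pvStepA o xs k = ((pvStepA o xs 0).1 + k, (pvStepA o xs 0).2) := by
  induction xs generalizing k with
  | nil => simp [pvStepA]
  | cons x rest ih =>
    by_cases h : x ≥ o
    · simp only [pvStepA, if_pos h]
      rw [ih (k + 1), ih (0 + 1)]
      simp [Prod.ext_iff]; ring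
    · simp only [pvStepA, if_neg h]
      rw [ih k]

theorem pvLoopA_cons (b : List Int) (x : Int) (xs : List Int) :
    pvLoopA (x :: xs) b = List.zipWith (· + ·) (pvContrib x b) (pvLoopA xs b) := by
  induction b generalizing x xs with
  | nil => simp [pvLoopA]
  | cons o bs ih =>
    by_cases h : x ≥ o
    · simp only [pvLoopA, pvContrib, pvStepA, if_pos h, List.zipWith]
      rw [pvStepA_acc o xs (0 + 1), ih]
      simp only [List.cons.injEq]
      exact ⟨by ring, trivial⟩
    · simp only [pvLoopA, pvContrib, pvStepA, if_neg h, List.zipWith]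
      rw [ih]
      simp

theorem pvLoopA_nil (b : List Int) : pvLoopA [] b = List.replicate b.length 0 := by
  induction b with
  | nil => simp [pvLoopA]
  | cons o bs ih => simp [pvLoopA, pvStepA, ih, List.replicate]

theorem pvLoopA_length (a b : List Int) : (pvLoopA a b).length = b.length := by
  induction b generalizing a with
  | nil => simp [pvLoopA]
  | cons o bs ih => simp [pvLoopA, ih]

theorem pvContrib_length (x : Int) (b : List Int) : (pvContrib x b).length = b.length := by
  induction b generalizing x with
  | nil => simp [pvContrib]
  | cons o bs ih => simp only [pvContrib]; split_ifs <;> simp [ih]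

theorem pvPassB_eq (x : Int) (b cs : List Int) :
    pvPassB x b cs = List.zipWith (· + ·) cs (pvContrib x b) := by
  induction b generalizing x cs with
  | nil => cases cs <;> simp [pvPassB, pvContrib]
  | cons o bs ih =>
    cases cs with
    | nil => simp [pvPassB, pvContrib]
    | cons c cs' =>
      by_cases h : x ≥ o <;> simp [pvPassB, pvContrib, h, ih]

theorem pvZipAdd_assoc (xs ys zs : List Int) :
    List.zipWith (· + ·) (List.zipWith (· + ·) xs ys) zs
      = List.zipWith (· + ·) xs (List.zipWith (· + ·) ys zs) := by
  induction xs generalizing ys zs with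
  | nil => simp
  | cons x xs' ih =>
    cases ys with
    | nil => simp
    | cons y ys' =>
      cases zs with
      | nil => simp
      | cons z zs' => simp [List.zipWith, ih]; ring

theorem pvZip_zero_right (cs : List Int) (m : Nat) (h : cs.length ≤ m) :
    List.zipWith (· + ·) cs (List.replicate m 0) = cs := by
  induction cs generalizing m with
  | nil => simp
  | cons c cs' ih =>
    cases m with
    | zero => simp at h
    | succ m' => simp [List.replicate, ih m' (by simpa using h)]

theorem pvZipAdd_replicate (l : List Int) :
    List.zipWith (· + ·) (List.replicate l.length 0) l = l := by
  induction l with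
  | nil => simp
  | cons x xs ih => simp [List.replicate, List.zipWith, ih]

theorem pvFoldB_eq (b : List Int) (a cs : List Int) (h : cs.length ≤ b.length) :
    a.foldl (fun cs v => pvPassB v b cs) cs
      = List.zipWith (· + ·) cs (pvLoopA a b) := by
  induction a generalizing cs with
  | nil =>
    simp only [List.foldl]
    rw [pvLoopA_nil, pvZip_zero_right cs b.length h]
  | cons x xs ih =>
    have hlen : (pvPassB x b cs).length ≤ b.length := by
      rw [pvPassB_eq]
      simp [pvContrib_length]
    simp only [List.foldl]
    rw [ih _ hlen, pvPassB_eq, pvZipAdd_assoc, ← pvLoopA_cons]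

-- ===== VERDICT (by name: the statement is the Claim_ definition above) =====
theorem sequenceMaintenance_spec : Claim_equal_sequenceMaintenance := by
  intro n q a b _
  unfold Spec_sequenceMaintenance sequenceMaintenance sequenceMaintenance_alt
  by_cases h : n = 0 ∨ a = []
  · simp [h]
  · simp only [h, if_neg, ite_false]
    rw [pvFoldB_eq b a _ (by simp), ← pvLoopA_length a b, pvZipAdd_replicate]
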